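-- pv_equiv track=rewrite | github.com/MrBrantCode/unitest_baseline | mut_generate/mist_train_cf/cf_51626/solution.py | custom_mix_strings
-- ===== SOURCE A (Python) =====
-- def custom_mix_strings(s1: str, s2: str) -> str:
--     i = 0
--     j = 0
--     s = ""
--     while (i < len(s1) or j < len(s2)) and (i < len(s1) or j < len(s2)):
--         if i < len(s1):
--             while i < len(s1) and not s1[i].isalpha():
--                 i += 1
--             if i < len(s1):
--                 s += s1[i].lower()
--                 i += 1
--         if j < len(s2):
--             while j < len(s2) and not s2[j].isalpha():
--                 j += 1
--             if j < len(s2):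
--                 s += s2[j].lower()
--                 j += 1
--     return s[::-1]
-- ===== SOURCE B (Python) =====
-- def custom_mix_strings(s1: str, s2: str) -> str:
--     a = [c.lower() for c in s1 if c.isalpha()]
--     b = [c.lower() for c in s2 if c.isalpha()]
--     mixed = [c for p in zip(a, b) for c in p] + a[len(b):] + b[len(a):]
--     return ''.join(mixed)[::-1]
-- ===== Notes on version B (the rewrite author's own statement) =====
-- stated objective: idiomatic
-- what changed: Replaces the fused two-index while loop with three declarative passes: filter+lowercase each string with comprehensions, interleave the two lists with zip plus the leftover tails, then join and reverse.
import Mathlib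
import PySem

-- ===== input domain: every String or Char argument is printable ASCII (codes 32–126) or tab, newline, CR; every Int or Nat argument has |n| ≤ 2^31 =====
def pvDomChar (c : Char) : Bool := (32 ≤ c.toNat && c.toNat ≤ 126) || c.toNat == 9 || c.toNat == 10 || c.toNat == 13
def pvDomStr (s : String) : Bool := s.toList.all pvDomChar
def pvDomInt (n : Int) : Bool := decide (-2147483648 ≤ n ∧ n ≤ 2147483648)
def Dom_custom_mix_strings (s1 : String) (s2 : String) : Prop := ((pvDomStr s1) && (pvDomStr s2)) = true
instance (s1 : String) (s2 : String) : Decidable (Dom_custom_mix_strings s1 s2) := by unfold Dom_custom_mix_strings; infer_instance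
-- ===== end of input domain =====

-- B replaces A's fused two-index while loop by filter/lowercase comprehensions, a zip-based
-- interleave with the leftover tails appended, and a final join+reverse (idiomatic; same cost).

-- ===== PORT A =====
-- inner `while i < len(s) and not s[i].isalpha(): i += 1`
def pvSkip (cs : List Char) (i : Nat) : Nat :=
  if h : i < cs.length then
    if PySem.Chars.isalpha cs[i] then i else pvSkip cs (i + 1)
  else i
termination_by cs.length - i


theorem pvSkip_ge (cs : List Char) (i : Nat) : i ≤ pvSkip cs i := by
  refine pvSkip.induct cs (fun i => i ≤ pvSkip cs i) ?_ ?_ ?_ i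
  · intro x h hal; unfold pvSkip; simp [h, hal]
  · intro x h hal ih; unfold pvSkip; simp only [dif_pos h, if_neg hal]; omega
  · intro x h; unfold pvSkip; simp [h]
-- one `if i < len(s): <skip>; if i < len(s): s += s[i].lower(); i += 1` block of A's loop body
def pvAdv (cs : List Char) (k : Nat) (acc : List Char) : Nat × List Char :=
  if k < cs.length then
    if h : pvSkip cs k < cs.length then
      (pvSkip cs k + 1, acc ++ [PySem.Chars.lowerChar cs[pvSkip cs k]])
    else (pvSkip cs k, acc)
  else (k, acc)

theorem pvAdv_ge (cs : List Char) (k : Nat) (acc : List Char) : k ≤ (pvAdv cs k acc).1 := by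
  have := pvSkip_ge cs k
  unfold pvAdv
  split_ifs <;> simp <;> omega

theorem pvAdv_gt (cs : List Char) (k : Nat) (acc : List Char) (hk : k < cs.length) :
    k < (pvAdv cs k acc).1 := by
  have := pvSkip_ge cs k
  unfold pvAdv
  split_ifs <;> simp <;> omega

-- A's outer `while (i < len(s1) or j < len(s2)) and (i < len(s1) or j < len(s2))`
-- (the duplicated conjunct collapses to the single disjunction)
def pvLoopA (cs1 cs2 : List Char) (i j : Nat) (acc : List Char) : List Char :=
  if i < cs1.length ∨ j < cs2.length then
    pvLoopA cs1 cs2 (pvAdv cs1 i acc).1 (pvAdv cs2 j (pvAdv cs1 i acc).2).1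
      (pvAdv cs2 j (pvAdv cs1 i acc).2).2
  else acc
termination_by (cs1.length - i) + (cs2.length - j)
decreasing_by
  have h1 := pvAdv_ge cs1 i acc
  have h2 := pvAdv_ge cs2 j (pvAdv cs1 i acc).2
  rcases (by assumption : i < cs1.length ∨ j < cs2.length) with h | h
  · have := pvAdv_gt cs1 i acc h; omega
  · have := pvAdv_gt cs2 j (pvAdv cs1 i acc).2 h; omega

def custom_mix_strings (s1 : String) (s2 : String) : String :=
  -- `return s[::-1]` : slicing with step -1 is exactly reversal
  String.ofList (pvLoopA s1.toList s2.toList 0 0 []).reverse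

-- ===== PORT B =====
-- `[c.lower() for c in s if c.isalpha()]`
def pvFilt (s : String) : List Char :=
  (s.toList.filter PySem.Chars.isalpha).map PySem.Chars.lowerChar

def custom_mix_strings_alt (s1 : String) (s2 : String) : String :=
  let a := pvFilt s1
  let b := pvFilt s2
  let mixed := (a.zip b).flatMap (fun p => [p.1, p.2]) ++ a.drop b.length ++ b.drop a.length
  -- `''.join(mixed)[::-1]` : join the chars, then reverse
  String.ofList mixed.reverse

-- ===== PRECONDITION & SPEC =====
def Spec_custom_mix_strings (s1 : String) (s2 : String) (out : String) : Prop := out = custom_mix_strings_alt s1 s2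
instance (s1 : String) (s2 : String) (out : String) : Decidable (Spec_custom_mix_strings s1 s2 out) := by unfold Spec_custom_mix_strings; infer_instance

-- ===== CLAIM (what is proved, stated in full; the proofs are below) =====
def Claim_equal_custom_mix_strings : Prop := ∀ (s1 : String) (s2 : String), Dom_custom_mix_strings s1 s2 → Spec_custom_mix_strings s1 s2 (custom_mix_strings s1 s2)

-- ===== LEMMAS AND PROOFS =====

-- proof-side: perfect interleaving with the longer tail appended
def pvIleave : List Char → List Char → List Char
  | [], b => b
  | a, [] => a
  | x :: a, y :: b => x :: y :: pvIleave a b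

-- the remaining lowercased letters of cs from index i on
def pvRest (cs : List Char) (i : Nat) : List Char :=
  ((cs.drop i).filter PySem.Chars.isalpha).map PySem.Chars.lowerChar

theorem pvRest_nil (cs : List Char) (i : Nat) (h : cs.length ≤ i) : pvRest cs i = [] := by
  unfold pvRest; rw [List.drop_eq_nil_of_le h]; rfl

theorem pvRest_cons (cs : List Char) (k : Nat) (hk : k < cs.length)
    (hal : PySem.Chars.isalpha cs[k] = true) :
    pvRest cs k = PySem.Chars.lowerChar cs[k] :: pvRest cs (k + 1) := by
  unfold pvRest
  rw [List.drop_eq_getElem_cons hk, List.filter_cons_of_pos hal, List.map_cons]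

theorem pvSkip_rest (cs : List Char) (i : Nat) : pvRest cs (pvSkip cs i) = pvRest cs i := by
  refine pvSkip.induct cs (fun i => pvRest cs (pvSkip cs i) = pvRest cs i) ?_ ?_ ?_ i
  · intro x h hal; unfold pvSkip; simp [h, hal]
  · intro x h hal ih
    unfold pvSkip
    simp only [dif_pos h, if_neg hal]
    rw [ih]
    unfold pvRest
    rw [List.drop_eq_getElem_cons h, List.filter_cons_of_neg (by simpa using hal)]
  · intro x h; unfold pvSkip; simp [h]

theorem pvSkip_alpha (cs : List Char) (i : Nat) :
    ∀ h : pvSkip cs i < cs.length, PySem.Chars.isalpha (cs[pvSkip cs i]'h) = true := by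
  refine pvSkip.induct cs
    (fun i => ∀ h : pvSkip cs i < cs.length, PySem.Chars.isalpha (cs[pvSkip cs i]'h) = true) ?_ ?_ ?_ i
  · intro x h hal
    have e : pvSkip cs x = x := by unfold pvSkip; simp [h, hal]
    intro h2
    simp only [e] at h2 ⊢
    exact hal
  · intro x h hal ih
    have e : pvSkip cs x = pvSkip cs (x + 1) := by
      conv_lhs => rw [pvSkip]
      simp only [dif_pos h, if_neg hal]
    intro h2
    simp only [e] at h2 ⊢
    exact ih h2
  · intro x h
    have e : pvSkip cs x = x := by unfold pvSkip; simp [h]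
    intro h2
    rw [e] at h2
    omega

theorem pvAdv_spec (cs : List Char) (i : Nat) (acc : List Char) :
    (pvAdv cs i acc).2 = acc ++ (pvRest cs i).take 1 ∧
    pvRest cs (pvAdv cs i acc).1 = (pvRest cs i).drop 1 := by
  unfold pvAdv
  by_cases hi : i < cs.length
  · have hrw := pvSkip_rest cs i
    by_cases hk : pvSkip cs i < cs.length
    · have hal := pvSkip_alpha cs i hk
      have hhd := pvRest_cons cs (pvSkip cs i) hk hal
      rw [if_pos hi, dif_pos hk]
      constructor
      · rw [← hrw, hhd]; simp
      · rw [← hrw, hhd]; simp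
    · have hnil : pvRest cs i = [] := by rw [← hrw]; exact pvRest_nil cs _ (by omega)
      rw [if_pos hi, dif_neg hk]
      constructor
      · rw [hnil]; simp
      · rw [hrw, hnil]; simp
  · have hnil : pvRest cs i = [] := pvRest_nil cs i (by omega)
    rw [if_neg hi]
    constructor
    · rw [hnil]; simp
    · rw [hnil]; simp

theorem pvIleave_nil_right (a : List Char) : pvIleave a [] = a := by
  cases a <;> rfl

theorem pvIleave_step (a b : List Char) :
    pvIleave a b = a.take 1 ++ b.take 1 ++ pvIleave (a.drop 1) (b.drop 1) := by
  cases a <;> cases b <;> simp [pvIleave, pvIleave_nil_right]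

theorem pvLoopA_eq (cs1 cs2 : List Char) (i j : Nat) (acc : List Char) :
    pvLoopA cs1 cs2 i j acc = acc ++ pvIleave (pvRest cs1 i) (pvRest cs2 j) := by
  refine pvLoopA.induct cs1 cs2
    (fun i j acc => pvLoopA cs1 cs2 i j acc = acc ++ pvIleave (pvRest cs1 i) (pvRest cs2 j))
    ?_ ?_ i j acc
  · intro i j acc hcond ih
    unfold pvLoopA
    rw [if_pos hcond, ih]
    obtain ⟨ha1, ha2⟩ := pvAdv_spec cs1 i acc
    obtain ⟨hb1, hb2⟩ := pvAdv_spec cs2 j (pvAdv cs1 i acc).2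
    rw [ha2, hb2, hb1, ha1, pvIleave_step (pvRest cs1 i) (pvRest cs2 j)]
    simp
  · intro i j acc hcond
    unfold pvLoopA
    rw [if_neg hcond]
    push Not at hcond
    rw [pvRest_nil cs1 i (by omega), pvRest_nil cs2 j (by omega)]
    simp [pvIleave]

theorem pvZip_eq_ileave (a b : List Char) :
    (a.zip b).flatMap (fun p => [p.1, p.2]) ++ a.drop b.length ++ b.drop a.length
      = pvIleave a b := by
  induction a generalizing b with
  | nil => simp [pvIleave]
  | cons x a ih =>
      cases b with
      | nil => simp [pvIleave_nil_right]
      | cons y b => simp [pvIleave, ih b]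

-- ===== VERDICT (by name: the statement is the Claim_ definition above) =====
theorem custom_mix_strings_spec : Claim_equal_custom_mix_strings := by
  intro s1 s2 _
  unfold Spec_custom_mix_strings custom_mix_strings
  rw [pvLoopA_eq, List.nil_append,
      show pvRest s1.toList 0 = pvFilt s1 from by simp [pvRest, pvFilt],
      show pvRest s2.toList 0 = pvFilt s2 from by simp [pvRest, pvFilt],
      ← pvZip_eq_ileave]
  rfl
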